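-- pv_equiv track=rewrite | github.com/BenWichser/Advent_of_code_2019 | 2019Day06Part1.py | make_orbit_dict
-- ===== SOURCE A (Python) =====
-- def make_orbit_dict(orbit_codes):
--     """Takes list of codes in form 'ASD)GGH' and turns them into dictionary.  key is first three digits.  value is list of last three (mult. occurances)Returns dictionary."""
--     orbit_dict = {}
--     for code in orbit_codes:
--         if code[0:3] in orbit_dict.keys():
--             orbit_dict[code[0:3]].append(code[4:])
--         else:
--             orbit_dict[code[0:3]] = [code[4:]]
--     return orbit_dict
-- ===== SOURCE B (Python) =====
-- def make_orbit_dict(orbit_codes):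
--     """Group orbit codes 'ABC)DEF' into {prefix: [suffixes]} via map/dedup/filter
--     comprehensions instead of an incremental check-then-append dict loop."""
--     pairs = [(code[0:3], code[4:]) for code in orbit_codes]
--     keys = list(dict.fromkeys(k for k, _ in pairs))
--     return {k: [v for kk, v in pairs if kk == k] for k in keys}
-- ===== Notes on version B (the rewrite author's own statement) =====
-- stated objective: alternative
-- what changed: replaced the incremental check-then-append dict loop with a three-stage comprehension pipeline: build (prefix,suffix) pairs, dedup the prefixes in first-occurrence order, and build each key's list by filtering the pairs
import Mathlib
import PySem

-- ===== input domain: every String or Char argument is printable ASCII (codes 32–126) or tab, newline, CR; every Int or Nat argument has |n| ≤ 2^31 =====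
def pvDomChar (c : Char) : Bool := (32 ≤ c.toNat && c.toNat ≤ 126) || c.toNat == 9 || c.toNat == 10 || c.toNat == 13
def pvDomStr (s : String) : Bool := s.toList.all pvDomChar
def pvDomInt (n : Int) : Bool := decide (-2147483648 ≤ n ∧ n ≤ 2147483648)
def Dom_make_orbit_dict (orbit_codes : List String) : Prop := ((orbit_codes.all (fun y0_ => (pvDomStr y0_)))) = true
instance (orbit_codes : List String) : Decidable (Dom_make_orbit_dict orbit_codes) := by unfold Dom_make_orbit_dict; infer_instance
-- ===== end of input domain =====

-- ===== PORT A =====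
-- B differs by decomposition (pairs + dedup + per-key filter); same cost class, not claimed faster.
-- code[0:3] / code[4:] ported as exact clamped slices on the character list
def make_orbit_dict (orbit_codes : List String) : List (String × List String) :=
  (orbit_codes.foldl (fun d code =>
      if d.contains (String.ofList (PySem.List.slice code.toList (some 0) (some 3))) then
        d.modify (String.ofList (PySem.List.slice code.toList (some 0) (some 3))) []
          (· ++ [String.ofList (PySem.List.slice code.toList (some 4) none)])
      else
        d.insert (String.ofList (PySem.List.slice code.toList (some 0) (some 3)))
          [String.ofList (PySem.List.slice code.toList (some 4) none)])
    PySem.Dict.empty).items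

-- ===== PORT B =====
def make_orbit_dict_alt (orbit_codes : List String) : List (String × List String) :=
  let pairs := orbit_codes.map (fun code =>
    (String.ofList (PySem.List.slice code.toList (some 0) (some 3)),
     String.ofList (PySem.List.slice code.toList (some 4) none)))
  let keys := PySem.List.dedup (pairs.map (·.1))
  keys.map (fun k => (k, (pairs.filter (fun p => p.1 == k)).map (·.2)))

-- ===== PRECONDITION & SPEC =====
def Spec_make_orbit_dict (orbit_codes : List String) (out : List (String × List String)) : Prop := out = make_orbit_dict_alt orbit_codes
instance (orbit_codes : List String) (out : List (String × List String)) : Decidable (Spec_make_orbit_dict orbit_codes out) := by unfold Spec_make_orbit_dict; infer_instance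

-- ===== CLAIM =====
def Claim_equal_make_orbit_dict : Prop := ∀ (orbit_codes : List String), Dom_make_orbit_dict orbit_codes → Spec_make_orbit_dict orbit_codes (make_orbit_dict orbit_codes)

-- ===== LEMMAS AND PROOFS =====
-- A's check-then-append step is uniformly a 'modify' (a missing key gets [] ++ [v] = [v])
theorem step_eq_modify (d : PySem.Dict String (List String)) (k : String) (v : String) :
    (if d.contains k then d.modify k [] (· ++ [v]) else d.insert k [v]) =
      d.modify k [] (· ++ [v]) := by
  by_cases h : d.contains k = true
  · simp [h]
  · simp [h, PySem.Dict.modify, PySem.Dict.getD_of_not_contains]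

theorem make_orbit_dict_spec : Claim_equal_make_orbit_dict := by
  intro orbit_codes _
  unfold Spec_make_orbit_dict make_orbit_dict make_orbit_dict_alt
  set key := fun code : String => String.ofList (PySem.List.slice code.toList (some 0) (some 3)) with hkey
  set val := fun code : String => String.ofList (PySem.List.slice code.toList (some 4) none) with hval
  have hstep : (orbit_codes.foldl (fun d code =>
      if d.contains (key code) then d.modify (key code) [] (· ++ [val code])
      else d.insert (key code) [val code]) PySem.Dict.empty) =
      ((orbit_codes.map (fun c => (key c, val c))).foldl
        (fun d p => d.modify p.1 [] (· ++ [p.2])) PySem.Dict.empty) := by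
    rw [List.foldl_map]
    congr 1
    funext d c
    exact step_eq_modify d (key c) (val c)
  rw [hstep]
  set pairs := orbit_codes.map (fun c => (key c, val c)) with hpairs
  set D := pairs.foldl (fun d p => d.modify p.1 [] (· ++ [p.2])) PySem.Dict.empty with hD
  have hnd : D.keys.Nodup := by
    rw [hD]
    exact PySem.Dict.nodup_keys_foldl_modify_key pairs Prod.fst [] _ _ (by simp)
  rw [PySem.Dict.items_eq_map_keys D hnd []]
  have hkeys : D.keys = PySem.List.dedup (pairs.map (·.1)) := by
    rw [hD, PySem.Dict.keys_foldl_modify_key]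
    simp [PySem.Set.update_nil_left]
  rw [hkeys]
  apply List.map_congr_left
  intro k _
  rw [hD, PySem.Dict.getD_foldl_modify_append]
  simp
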